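-- pv_equiv track=rewrite | github.com/pypi-data/pypi-mirror-389 | packages/simplemagic/simplemagic-0.1.12.tar.gz/simplemagic-0.1.12/simplemagic/magic.py | lax_extensions_compare
-- ===== SOURCE A (Python) =====
-- def lax_extensions_compare(ext, exts, lax_extensions_settings):
--     if ext in exts:
--         return True
--     lax_extensions_settings = lax_extensions_settings or []
--     for lax_extensions in lax_extensions_settings:
--         if ext in lax_extensions:
--             for lax_ext in lax_extensions:
--                 if lax_ext in exts:
--                     return True
--     return False
-- ===== SOURCE B (Python) =====
-- def lax_extensions_compare(ext, exts, lax_extensions_settings):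
--     # Inverted traversal: scan the target collection `exts` once, asking for each
--     # element whether it is related to `ext` (equal, or a co-member of some lax group).
--     groups = lax_extensions_settings or []
--
--     def related(e):
--         return e == ext or any(ext in g and e in g for g in groups)
--
--     return any(related(e) for e in exts)
-- ===== Notes on version B (the rewrite author's own statement) =====
-- stated objective: alternative
-- what changed: B inverts the traversal: instead of scanning lax groups containing ext and probing their members against exts, B scans exts once and asks for each element whether it is related to ext (equal, or co-member of some lax group).
import Mathlib
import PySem

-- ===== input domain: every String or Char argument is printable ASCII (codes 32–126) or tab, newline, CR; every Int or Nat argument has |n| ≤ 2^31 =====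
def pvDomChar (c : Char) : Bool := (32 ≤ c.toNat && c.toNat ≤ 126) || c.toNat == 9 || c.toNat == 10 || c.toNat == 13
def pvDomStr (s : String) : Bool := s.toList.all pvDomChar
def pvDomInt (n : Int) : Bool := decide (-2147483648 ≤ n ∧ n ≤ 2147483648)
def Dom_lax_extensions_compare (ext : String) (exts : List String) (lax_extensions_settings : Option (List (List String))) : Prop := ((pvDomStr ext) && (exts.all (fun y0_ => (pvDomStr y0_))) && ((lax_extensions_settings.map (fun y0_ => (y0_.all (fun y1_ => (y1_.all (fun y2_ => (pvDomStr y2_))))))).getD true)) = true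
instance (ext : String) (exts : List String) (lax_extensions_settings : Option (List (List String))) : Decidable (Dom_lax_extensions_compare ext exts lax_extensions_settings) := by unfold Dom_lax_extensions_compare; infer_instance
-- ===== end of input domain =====

-- B inverts the traversal: it scans exts once, checking each element for relatedness to ext (alternative decomposition, similar cost).

-- ===== PORT A =====
def laxLoopA (ext : String) (exts : List String) : List (List String) → Bool
  | [] => false
  | g :: rest =>
    if g.contains ext then
      (if g.any (fun lax_ext => exts.contains lax_ext) then true else laxLoopA ext exts rest)
    else laxLoopA ext exts rest

def lax_extensions_compare (ext : String) (exts : List String) (lax_extensions_settings : Option (List (List String))) : Bool :=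
  if exts.contains ext then true
  else laxLoopA ext exts (lax_extensions_settings.getD [])

-- ===== PORT B =====
def laxRelated (ext : String) (groups : List (List String)) (e : String) : Bool :=
  e == ext || groups.any (fun g => g.contains ext && g.contains e)

def lax_extensions_compare_alt (ext : String) (exts : List String) (lax_extensions_settings : Option (List (List String))) : Bool :=
  let groups := lax_extensions_settings.getD []
  exts.any (fun e => laxRelated ext groups e)

-- ===== PRECONDITION & SPEC =====
def Spec_lax_extensions_compare (ext : String) (exts : List String) (lax_extensions_settings : Option (List (List String))) (out : Bool) : Prop := out = lax_extensions_compare_alt ext exts lax_extensions_settings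
instance (ext : String) (exts : List String) (lax_extensions_settings : Option (List (List String))) (out : Bool) : Decidable (Spec_lax_extensions_compare ext exts lax_extensions_settings out) := by unfold Spec_lax_extensions_compare; infer_instance

-- ===== CLAIM (what is proved, stated in full; the proofs are below) =====
def Claim_equal_lax_extensions_compare : Prop := ∀ (ext : String) (exts : List String) (lax_extensions_settings : Option (List (List String))), Dom_lax_extensions_compare ext exts lax_extensions_settings → Spec_lax_extensions_compare ext exts lax_extensions_settings (lax_extensions_compare ext exts lax_extensions_settings)

-- ===== LEMMAS AND PROOFS =====

lemma laxLoopA_cons (ext : String) (exts g : List String) (rest : List (List String)) :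
    laxLoopA ext exts (g :: rest) =
      ((g.contains ext && g.any (fun e => exts.contains e)) || laxLoopA ext exts rest) := by
  simp only [laxLoopA]
  by_cases hc : ext ∈ g <;> by_cases ha : ∃ e ∈ g, e ∈ exts <;> simp [hc, ha]

lemma laxLoopA_eq (ext : String) (exts : List String) (gs : List (List String)) :
    laxLoopA ext exts gs = gs.any (fun g => g.contains ext && g.any (fun e => exts.contains e)) := by
  induction gs with
  | nil => rfl
  | cons g rest ih => rw [laxLoopA_cons, ih, List.any_cons]

-- ===== VERDICT (by name: the statement is the Claim_ definition above) =====
theorem lax_extensions_compare_spec : Claim_equal_lax_extensions_compare := by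
  intro ext exts ls _
  show lax_extensions_compare ext exts ls = lax_extensions_compare_alt ext exts ls
  unfold lax_extensions_compare lax_extensions_compare_alt laxRelated
  rw [Bool.eq_iff_iff, laxLoopA_eq]
  split_ifs with h
  · have h' : ext ∈ exts := by simpa using h
    simp only [List.any_eq_true, Bool.or_eq_true, beq_iff_eq]
    exact ⟨fun _ => ⟨ext, h', Or.inl rfl⟩, fun _ => trivial⟩
  · have h' : ext ∉ exts := by simpa using h
    simp only [List.any_eq_true, Bool.and_eq_true, Bool.or_eq_true, beq_iff_eq,
      List.contains_eq_mem, decide_eq_true_eq]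
    constructor
    · rintro ⟨g, hg, hgc, e, he, hee⟩
      exact ⟨e, hee, Or.inr ⟨g, hg, hgc, he⟩⟩
    · rintro ⟨e, hee, rfl | ⟨g, hg, hgc, he⟩⟩
      · exact absurd hee h'
      · exact ⟨g, hg, hgc, e, he, hee⟩
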